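-- pv_equiv track=rewrite | github.com/luckytypr/example | code/sentiment_analyzer.py | countTotalBrackets
-- ===== SOURCE A (Python) =====
-- def countTotalBrackets(sentence):
--     total,step = 0,0
--     for i in range(len(sentence)):
--         if sentence[i] == "(":
--             if step > 0:
--                 total +=step
--                 step=0
--             step -=1
--         elif sentence[i] == ")":
--             if step < 0:
--                 total +=step
--                 step=0
--             step +=1
--     total+=step
--     return total
-- ===== SOURCE B (Python) =====
-- def countTotalBrackets(sentence):
--     return sentence.count(")") - sentence.count("(")
-- ===== Notes on version B (the rewrite author's own statement) =====
-- stated objective: simpler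
-- what changed: Replaced the stateful per-character scan with a signed run-length accumulator and conditional flushes by the closed form: the count of closing brackets minus the count of opening brackets, computed with two str.count calls.
import Mathlib
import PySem

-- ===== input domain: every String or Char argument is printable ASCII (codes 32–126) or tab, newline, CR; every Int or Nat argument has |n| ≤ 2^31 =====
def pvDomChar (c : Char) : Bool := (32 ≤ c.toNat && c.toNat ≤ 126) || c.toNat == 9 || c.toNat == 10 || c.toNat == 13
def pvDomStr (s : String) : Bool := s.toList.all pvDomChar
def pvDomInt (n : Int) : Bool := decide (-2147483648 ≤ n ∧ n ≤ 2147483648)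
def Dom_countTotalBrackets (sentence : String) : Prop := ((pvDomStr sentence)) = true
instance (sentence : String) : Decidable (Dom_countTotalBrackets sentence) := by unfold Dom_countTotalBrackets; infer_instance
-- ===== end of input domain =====

-- B replaces A's running signed step accumulator with the closed form count(')') - count('(') (simpler).

-- ===== PORT A =====
-- the loop body of A, one character at a time, over state (total, step)
def countTotalBracketsStep (p : Int × Int) (c : Char) : Int × Int :=
  if c = '(' then
    let p' := if p.2 > 0 then (p.1 + p.2, (0 : Int)) else p
    (p'.1, p'.2 - 1)
  else if c = ')' then
    let p' := if p.2 < 0 then (p.1 + p.2, (0 : Int)) else p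
    (p'.1, p'.2 + 1)
  else p

def countTotalBrackets (sentence : String) : Int :=
  let r := sentence.toList.foldl countTotalBracketsStep (0, 0)
  r.1 + r.2

-- ===== PORT B =====
def countTotalBrackets_alt (sentence : String) : Int :=
  (PySem.Str.count sentence ")" : Int) - (PySem.Str.count sentence "(" : Int)

-- ===== PRECONDITION & SPEC =====
def Spec_countTotalBrackets (sentence : String) (out : Int) : Prop := out = countTotalBrackets_alt sentence
instance (sentence : String) (out : Int) : Decidable (Spec_countTotalBrackets sentence out) := by unfold Spec_countTotalBrackets; infer_instance

-- ===== CLAIM (what is proved, stated in full; the proofs are below) =====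
def Claim_equal_countTotalBrackets : Prop := ∀ (sentence : String), Dom_countTotalBrackets sentence → Spec_countTotalBrackets sentence (countTotalBrackets sentence)

-- ===== LEMMAS AND PROOFS =====

-- A's flushes only move `step` into `total`: the sum total+step advances by +1 on ')', -1 on '('.
theorem foldl_step_sum (l : List Char) : ∀ t s : Int,
    (l.foldl countTotalBracketsStep (t, s)).1 + (l.foldl countTotalBracketsStep (t, s)).2
      = t + s + (l.count ')' : Int) - (l.count '(' : Int) := by
  induction l with
  | nil => intro t s; simp
  | cons c tl ih =>
    intro t s
    simp only [List.foldl_cons, List.count_cons]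
    rcases eq_or_ne c '(' with hc | hc
    · subst hc
      by_cases hs : s > 0 <;>
        simp [countTotalBracketsStep, hs, ih] <;> ring
    · rcases eq_or_ne c ')' with hc2 | hc2
      · subst hc2
        by_cases hs : s < 0 <;>
          simp [countTotalBracketsStep, hs, ih] <;> ring
      · simp [countTotalBracketsStep, hc, hc2, ih]

-- str.count with a single-character needle is the character count
theorem count_go_singleton (c : Char) (l : List Char) : ∀ (fuel acc : Nat), l.length ≤ fuel →
    PySem.Chars.count.go [c] fuel l acc = acc + l.count c := by
  induction l with
  | nil => intro fuel acc _; cases fuel <;> simp [PySem.Chars.count.go]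
  | cons h t ih =>
    intro fuel acc hf
    cases fuel with
    | zero => simp at hf
    | succ n =>
      have ht : t.length ≤ n := by simpa using hf
      by_cases hc : h = c
      · subst hc
        simp [PySem.Chars.count.go, List.isPrefixOf, ih n (acc + 1) ht]
        omega
      · have : [c].isPrefixOf (h :: t) = false := by
          simp [List.isPrefixOf]; exact fun e => hc e.symm
        simp [PySem.Chars.count.go, this, ih n acc ht, hc]

theorem str_count_singleton (s : String) (c : Char) :
    PySem.Str.count s (String.ofList [c]) = s.toList.count c := by
  simp [PySem.Str.count, PySem.Chars.count, List.isEmpty]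
  simpa using count_go_singleton c s.toList s.toList.length 0 (le_refl _)

-- ===== VERDICT (by name: the statement is the Claim_ definition above) =====
theorem countTotalBrackets_spec : Claim_equal_countTotalBrackets := by
  intro s _
  show countTotalBrackets s = countTotalBrackets_alt s
  have h1 : (")" : String) = String.ofList [')'] := rfl
  have h2 : ("(" : String) = String.ofList ['('] := rfl
  simp only [countTotalBrackets, countTotalBrackets_alt, h1, h2,
    str_count_singleton, foldl_step_sum]
  ring
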